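-- pv_equiv track=rewrite | github.com/pakx2206/pp1 | 04-Subroutines/zad4.40.py | f
-- ===== SOURCE A (Python) =====
-- def f(number):
--     it=0
--     sum=0
--     number = str(number)
--     for x in range(0,10,1):
--         it=0
--         for y in range(0, len(number)):
--             if int(number[y])==x:
--                 it+=1
--         if it>1:
--             sum+=x*it
--     return sum
-- ===== SOURCE B (Python) =====
-- def f(number):
--     counts = {}
--     for c in str(number):
--         d = int(c)
--         counts[d] = counts.get(d, 0) + 1
--     return sum(d * n for d, n in counts.items() if n > 1)
-- ===== Notes on version B (the rewrite author's own statement) =====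
-- stated objective: simpler
-- what changed: Replaces the ten-pass scan (for each possible digit, rescan the whole string) by a single pass building a digit-frequency dict, then sums d*n over entries with n>1.
import Mathlib
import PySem

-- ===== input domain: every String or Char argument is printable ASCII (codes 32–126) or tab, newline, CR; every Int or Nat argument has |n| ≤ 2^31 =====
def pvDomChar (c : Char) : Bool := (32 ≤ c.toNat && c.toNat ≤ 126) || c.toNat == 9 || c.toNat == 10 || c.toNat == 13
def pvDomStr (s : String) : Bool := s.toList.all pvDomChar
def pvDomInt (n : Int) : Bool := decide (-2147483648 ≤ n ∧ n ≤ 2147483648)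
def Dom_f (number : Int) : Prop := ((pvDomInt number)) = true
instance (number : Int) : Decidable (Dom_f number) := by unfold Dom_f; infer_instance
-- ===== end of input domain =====

-- B builds one digit-frequency dict in a single pass instead of A's ten rescans of str(number);
-- equal return values on all number ≥ 0 (both raise ValueError on the '-' of a negative number).

-- ===== PORT A =====
def f (number : Int) : Int :=
  let s := PySem.Int.toChars number
  (PySem.List.pyRange 0 10 1).foldl (fun sum x =>
      let it := (PySem.List.pyRange 0 (s.length : Int) 1).foldl
        (fun it y =>
          if (PySem.Int.ofChars? [PySem.List.pyGetD s y ' ']).getD 0 == x then it + 1 else it) 0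
      if it > 1 then sum + x * it else sum) 0

-- ===== PORT B =====
def f_alt (number : Int) : Int :=
  let counts := (PySem.Int.toChars number).foldl
    (fun d c =>
      let dg := (PySem.Int.ofChars? [c]).getD 0
      d.insert dg (d.getD dg 0 + 1)) (PySem.Dict.empty : PySem.Dict Int Int)
  ((counts.items.filter (fun p => p.2 > 1)).map (fun p => p.1 * p.2)).sum

-- ===== PRECONDITION & SPEC =====
-- Pre_ excludes negative numbers: on them str(number) starts with '-' and int('-') raises
-- ValueError in A (and in B alike).
def Pre_f (number : Int) : Prop := 0 ≤ number
instance (number : Int) : Decidable (Pre_f number) := by unfold Pre_f; infer_instance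
def pvWitness_f : Int := 122

def Spec_f (number : Int) (out : Int) : Prop := out = f_alt number
instance (number : Int) (out : Int) : Decidable (Spec_f number out) := by unfold Spec_f; infer_instance

-- ===== CLAIM (what is proved, stated in full; the proofs are below) =====
def Claim_equal_f : Prop := ∀ (number : Int), Dom_f number → Pre_f number → Spec_f number (f number)

-- ===== LEMMAS AND PROOFS =====

def pvDigits : List Char := ['0','1','2','3','4','5','6','7','8','9']

lemma toDigitsCore_mem_pvDigits : ∀ (fuel n : Nat) (acc : List Char),
    (∀ c ∈ acc, c ∈ pvDigits) → ∀ c ∈ Nat.toDigitsCore 10 fuel n acc, c ∈ pvDigits := by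
  intro fuel
  induction fuel with
  | zero => intro n acc hacc c hc; exact hacc c hc
  | succ fuel ih =>
    intro n acc hacc c hc
    have hd : Nat.digitChar (n % 10) ∈ pvDigits := by
      have h10 : n % 10 < 10 := Nat.mod_lt _ (by norm_num)
      set m := n % 10 with hm
      interval_cases m <;> decide
    simp only [Nat.toDigitsCore] at hc
    split at hc
    · rcases (by simpa using hc : c = (n % 10).digitChar ∨ c ∈ acc) with h | h
      · exact h ▸ hd
      · exact hacc c h
    · refine ih (n / 10) _ ?_ c hc
      intro d hdm
      cases hdm with
      | head => exact hd
      | tail _ hdm' => exact hacc d hdm'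

lemma toChars_mem_pvDigits (n : Int) (h : 0 ≤ n) :
    ∀ c ∈ PySem.Int.toChars n, c ∈ pvDigits := by
  intro c hc
  unfold PySem.Int.toChars at hc
  rw [if_neg (by omega)] at hc
  exact toDigitsCore_mem_pvDigits _ _ [] (by intro d hd; cases hd) c hc

lemma gval_bounds (c : Char) (hc : c ∈ pvDigits) :
    0 ≤ (PySem.Int.ofChars? [c]).getD 0 ∧ (PySem.Int.ofChars? [c]).getD 0 < 10 := by
  fin_cases hc <;> decide

lemma sum_map_filter_eq (l : List Int) (q : Int → Prop) [DecidablePred q] (t : Int → Int) :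
    ((l.filter (fun x => decide (q x))).map t).sum = (l.map (fun x => if q x then t x else 0)).sum := by
  induction l with
  | nil => rfl
  | cons a l ih =>
    by_cases h : q a
    · simp [h, ih]
    · simp [h, ih]

-- core: the 0..9 scan and the distinct-digit scan sum the same contributions
lemma core_sum (digs : List Int) (h : ∀ d ∈ digs, 0 ≤ d ∧ d < 10) :
    ((PySem.List.pyRange 0 10 1).map
        (fun x => if (digs.count x : Int) > 1 then x * (digs.count x : Int) else 0)).sum
    = (((PySem.Set.ofList digs).filter (fun k => decide ((digs.count k : Int) > 1))).map
        (fun k => k * (digs.count k : Int))).sum := by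
  rw [← sum_map_filter_eq (PySem.List.pyRange 0 10 1) (fun x => (digs.count x : Int) > 1)
        (fun x => x * (digs.count x : Int))]
  refine List.Perm.sum_eq (List.Perm.map _ ?_)
  rw [List.perm_ext_iff_of_nodup
        (List.Nodup.filter _ (PySem.List.nodup_pyRange_one 0 10))
        (List.Nodup.filter _ (PySem.Set.nodup_ofList digs))]
  intro a
  simp only [List.mem_filter, PySem.List.mem_pyRange_one, PySem.Set.mem_ofList,
    decide_eq_true_eq]
  constructor
  · rintro ⟨_, hq⟩
    refine ⟨List.count_pos_iff.mp ?_, hq⟩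
    omega
  · rintro ⟨hmem, hq⟩
    exact ⟨⟨(h a hmem).1, (h a hmem).2⟩, hq⟩

lemma f_eq_sum (number : Int) :
    f number = ((PySem.List.pyRange 0 10 1).map
      (fun x =>
        if ((((PySem.Int.toChars number).map (fun c => (PySem.Int.ofChars? [c]).getD 0)).count x : Int)) > 1
        then x * (((PySem.Int.toChars number).map (fun c => (PySem.Int.ofChars? [c]).getD 0)).count x : Int)
        else 0)).sum := by
  simp only [f]
  have hinner : ∀ x : Int,
      List.foldl (fun it y =>
        if ((PySem.Int.ofChars? [PySem.List.pyGetD (PySem.Int.toChars number) y ' ']).getD 0 == x) = true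
        then it + 1 else it) 0 (PySem.List.pyRange 0 ((PySem.Int.toChars number).length : Int) 1)
      = (((PySem.Int.toChars number).map (fun c => (PySem.Int.ofChars? [c]).getD 0)).count x : Int) := by
    intro x
    rw [PySem.List.foldl_pyRange_zero_pyGetD' (PySem.Int.toChars number) ' '
          (fun it c => if (PySem.Int.ofChars? [c]).getD 0 == x then it + 1 else it) 0,
        PySem.List.foldl_if_add_one (fun c => (PySem.Int.ofChars? [c]).getD 0 == x)
          (PySem.Int.toChars number) 0,
        show (List.countP (fun c => (PySem.Int.ofChars? [c]).getD 0 == x) (PySem.Int.toChars number))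
            = ((PySem.Int.toChars number).map (fun c => (PySem.Int.ofChars? [c]).getD 0)).count x from by
          rw [List.count_eq_countP, List.countP_map]; rfl]
    omega
  simp only [hinner]
  have hbody : ∀ (acc x : Int),
      (if (((PySem.Int.toChars number).map (fun c => (PySem.Int.ofChars? [c]).getD 0)).count x : Int) > 1
       then acc + x * (((PySem.Int.toChars number).map (fun c => (PySem.Int.ofChars? [c]).getD 0)).count x : Int)
       else acc)
      = acc + (if (((PySem.Int.toChars number).map (fun c => (PySem.Int.ofChars? [c]).getD 0)).count x : Int) > 1
       then x * (((PySem.Int.toChars number).map (fun c => (PySem.Int.ofChars? [c]).getD 0)).count x : Int)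
       else 0) := by
    intro acc x; split <;> simp
  simp only [hbody]
  rw [PySem.List.foldl_add]
  simp

lemma f_alt_eq_sum (number : Int) :
    f_alt number =
      (((PySem.Set.ofList ((PySem.Int.toChars number).map (fun c => (PySem.Int.ofChars? [c]).getD 0))).filter
          (fun k => decide (((((PySem.Int.toChars number).map (fun c => (PySem.Int.ofChars? [c]).getD 0)).count k : Int)) > 1))).map
        (fun k => k * (((PySem.Int.toChars number).map (fun c => (PySem.Int.ofChars? [c]).getD 0)).count k : Int))).sum := by
  simp only [f_alt]
  rw [show ((PySem.Int.toChars number).foldl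
        (fun d c =>
          let dg := (PySem.Int.ofChars? [c]).getD 0
          d.insert dg (d.getD dg 0 + 1)) (PySem.Dict.empty : PySem.Dict Int Int))
      = PySem.Dict.counter ((PySem.Int.toChars number).map (fun c => (PySem.Int.ofChars? [c]).getD 0)) from by
    rw [← PySem.Dict.foldl_insert_getD_add_one_eq_counter, List.foldl_map]]
  rw [PySem.Dict.items_counter, List.filter_map, List.map_map]
  rfl

theorem f_spec : Claim_equal_f := by
  intro number _ hpre
  unfold Spec_f
  rw [f_eq_sum, f_alt_eq_sum]
  apply core_sum
  intro d hd
  rcases List.mem_map.mp hd with ⟨c, hc, rfl⟩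
  exact gval_bounds c (toChars_mem_pvDigits number hpre c hc)
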